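-- pv_equiv track=rewrite | github.com/Ayoyis/DocGen-AI | backend/app/main.py | add_comments_to_code
-- ===== SOURCE A (Python) =====
-- from typing import List, Optional, Tuple
--
-- def add_comments_to_code(
--     code: str,
--     comments: List[Tuple[int, str]],
--     language: str,
-- ) -> str:
--     """O(n) comment insertion using dict lookup."""
--     lines = code.split("\n")
--     result_lines: List[str] = []
--     comment_map: dict[int, str] = {line_num: comment for line_num, comment in comments}
--
--     for i, line in enumerate(lines, 1):
--         if i in comment_map:
--             indent_len = len(line) - len(line.lstrip())
--             indentation = line[:indent_len]
--             result_lines.append(indentation + comment_map[i])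
--         result_lines.append(line)
--
--     return "\n".join(result_lines)
-- ===== SOURCE B (Python) =====
-- def add_comments_to_code(code, comments, language):
--     lines = code.split("\n")
--     n = len(lines)
--     comment_map = dict(comments)
--     for i in sorted(comment_map, reverse=True):
--         if 1 <= i <= n:
--             line = lines[i - 1]
--             indent_len = len(line) - len(line.lstrip())
--             lines.insert(i - 1, line[:indent_len] + comment_map[i])
--     return "\n".join(lines)
-- ===== Notes on version B (the rewrite author's own statement) =====
-- stated objective: alternative
-- what changed: Instead of streaming every line and appending to a result list, B builds the line list once, sorts the comment line numbers descending, and splices each comment into the list in place with insert, so later insertions never shift earlier target indices.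
import Mathlib
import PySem

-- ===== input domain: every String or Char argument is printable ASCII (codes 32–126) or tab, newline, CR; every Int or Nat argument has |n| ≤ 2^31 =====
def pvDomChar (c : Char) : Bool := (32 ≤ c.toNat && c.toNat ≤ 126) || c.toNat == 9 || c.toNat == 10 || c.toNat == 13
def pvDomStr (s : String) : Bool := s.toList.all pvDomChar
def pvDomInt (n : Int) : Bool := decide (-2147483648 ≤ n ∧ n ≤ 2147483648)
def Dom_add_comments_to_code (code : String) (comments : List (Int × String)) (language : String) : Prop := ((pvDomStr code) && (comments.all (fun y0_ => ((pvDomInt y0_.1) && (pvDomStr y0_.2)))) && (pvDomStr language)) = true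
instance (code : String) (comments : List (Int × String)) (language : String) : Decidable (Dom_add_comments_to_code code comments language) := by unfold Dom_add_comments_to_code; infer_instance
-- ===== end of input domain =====

-- ===== PORT A =====
-- B changes the traversal: instead of streaming every line, it sorts the comment line numbers
-- descending and splices each comment into the line list in place; same result, no speed claim.
-- shared helper: Python's 'indentation = line[:len(line)-len(line.lstrip())]' (identical two lines in A and B)
def pvIndent (line : String) : String :=
  PySem.Str.slice line none (some (PySem.Str.len line - PySem.Str.len (PySem.Str.lstrip line)))

def add_comments_to_code (code : String) (comments : List (Int × String)) (language : String) : String :=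
  let lines := (PySem.Str.split? code "\n").getD []
  let comment_map : PySem.Dict Int String :=
    comments.foldl (fun d p => d.insert p.1 p.2) PySem.Dict.empty
  let result_lines : List String :=
    (PySem.List.enumerate lines 1).foldl
      (fun acc il =>
        match comment_map.get? il.1 with
        | some c => (acc ++ [pvIndent il.2 ++ c]) ++ [il.2]
        | none => acc ++ [il.2]) []
  PySem.Str.join "\n" result_lines

-- ===== PORT B =====
def add_comments_to_code_alt (code : String) (comments : List (Int × String)) (language : String) : String :=
  let lines := (PySem.Str.split? code "\n").getD []
  let n : Int := lines.length
  let comment_map : PySem.Dict Int String :=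
    comments.foldl (fun d p => d.insert p.1 p.2) PySem.Dict.empty
  let final :=
    (PySem.List.sorted comment_map.keys (fun k => k) true).foldl
      (fun ls i =>
        if 1 ≤ i ∧ i ≤ n then
          PySem.List.insert ls (i - 1)
            (pvIndent (PySem.List.pyGetD ls (i - 1) "") ++ comment_map.getD i "")
        else ls) lines
  PySem.Str.join "\n" final

-- ===== PRECONDITION & SPEC =====
def Spec_add_comments_to_code (code : String) (comments : List (Int × String)) (language : String) (out : String) : Prop := out = add_comments_to_code_alt code comments language
instance (code : String) (comments : List (Int × String)) (language : String) (out : String) : Decidable (Spec_add_comments_to_code code comments language out) := by unfold Spec_add_comments_to_code; infer_instance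

-- ===== CLAIM (what is proved, stated in full; the proofs are below) =====
def Claim_equal_add_comments_to_code : Prop := ∀ (code : String) (comments : List (Int × String)) (language : String), Dom_add_comments_to_code code comments language → Spec_add_comments_to_code code comments language (add_comments_to_code code comments language)

-- ===== LEMMAS AND PROOFS =====
-- the common shape: every line of ls, each preceded by its comment (indices counted from i)
def interC (g : Int → String) (ks : List Int) : List String → Int → List String
  | [], _ => []
  | l :: ls, i => (if i ∈ ks then [pvIndent l ++ g i] else []) ++ l :: interC g ks ls (i + 1)

lemma interC_no_hit (g : Int → String) (ks : List Int) :
    ∀ (ls : List String) (i : Int), (∀ k ∈ ks, k < i) → interC g ks ls i = ls := by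
  intro ls
  induction ls with
  | nil => intro i _; rfl
  | cons l t ih =>
    intro i h
    have hni : i ∉ ks := fun hm => absurd (h i hm) (lt_irrefl i)
    have h' : ∀ k ∈ ks, k < i + 1 := by
      intro k hk
      have := h k hk
      omega
    have ht : interC g ks t (i + 1) = t := ih (i + 1) h'
    simp [interC, if_neg hni, ht]

lemma interC_congr (g : Int → String) (ks ks' : List Int) :
    ∀ (ls : List String) (i : Int),
      (∀ j : Int, i ≤ j → j < i + ls.length → (j ∈ ks ↔ j ∈ ks')) →
      interC g ks ls i = interC g ks' ls i := by
  intro ls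
  induction ls with
  | nil => intro i _; rfl
  | cons l t ih =>
    intro i h
    have hi : (i ∈ ks) = (i ∈ ks') := by
      have := h i le_rfl (by simp only [List.length_cons]; push_cast; omega)
      simp [this]
    simp only [interC, hi]
    rw [ih (i + 1) ?_]
    intro j h1 h2
    apply h j (by omega)
    simp only [List.length_cons] at h2 ⊢
    push_cast at h2 ⊢
    omega

lemma interC_append (g : Int → String) (ks : List Int) :
    ∀ (u v : List String) (i : Int),
      interC g ks (u ++ v) i = interC g ks u i ++ interC g ks v (i + u.length) := by
  intro u
  induction u with
  | nil => intro v i; simp [interC]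
  | cons l t ih =>
    intro v i
    simp only [List.cons_append, interC, List.append_assoc]
    rw [ih v (i + 1)]
    have : i + 1 + (t.length : Int) = i + ((l :: t).length : Int) := by
      simp only [List.length_cons]; push_cast; ring
    rw [this]

lemma aFold (m : PySem.Dict Int String) :
    ∀ (ls : List String) (i : Int) (acc : List String),
      (PySem.List.enumerate ls i).foldl
        (fun acc il =>
          match m.get? il.1 with
          | some c => (acc ++ [pvIndent il.2 ++ c]) ++ [il.2]
          | none => acc ++ [il.2]) acc
      = acc ++ interC (fun j => m.getD j "") m.keys ls i := by
  intro ls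
  induction ls with
  | nil => intro i acc; simp [PySem.List.enumerate_nil, interC]
  | cons l t ih =>
    intro i acc
    rw [PySem.List.enumerate_cons]
    simp only [List.foldl_cons]
    cases hg : m.get? i with
    | some c =>
      have hmem : i ∈ m.keys := by
        by_contra hni
        rw [(PySem.Dict.get?_eq_none_iff_not_mem_keys m i).mpr hni] at hg
        simp at hg
      have hgd : m.getD i "" = c := PySem.Dict.getD_of_get?_eq_some m "" hg
      rw [ih]
      simp [interC, if_pos hmem, hgd]
    | none =>
      have hni : i ∉ m.keys := (PySem.Dict.get?_eq_none_iff_not_mem_keys m i).mp hg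
      rw [ih]
      simp [interC, if_neg hni]

lemma bFold_prefix (d : PySem.Dict Int String) (n : Int) :
    ∀ (ks : List Int) (u v : List String),
      (∀ j ∈ ks, 1 ≤ j ∧ j ≤ n → j ≤ (u.length : Int)) →
      ks.foldl
        (fun ls i =>
          if 1 ≤ i ∧ i ≤ n then
            PySem.List.insert ls (i - 1)
              (pvIndent (PySem.List.pyGetD ls (i - 1) "") ++ d.getD i "")
          else ls) (u ++ v)
      = ks.foldl
          (fun ls i =>
            if 1 ≤ i ∧ i ≤ n then
              PySem.List.insert ls (i - 1)
                (pvIndent (PySem.List.pyGetD ls (i - 1) "") ++ d.getD i "")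
            else ls) u ++ v := by
  intro ks
  induction ks with
  | nil => intro u v _; rfl
  | cons k rest ih =>
    intro u v h
    simp only [List.foldl_cons]
    by_cases hc : 1 ≤ k ∧ k ≤ n
    · have hk : k ≤ (u.length : Int) := h k (List.mem_cons_self) hc
      have hp : (k - 1).toNat < u.length := by omega
      have hcast : k - 1 = (((k - 1).toNat : Nat) : Int) := by omega
      have hget : PySem.List.pyGetD (u ++ v) (k - 1) "" = PySem.List.pyGetD u (k - 1) "" := by
        rw [PySem.List.pyGetD_eq_getElem (u ++ v) "" (by omega)
              (by simp only [List.length_append]; push_cast; omega),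
            PySem.List.pyGetD_eq_getElem u "" (by omega) (by omega),
            List.getElem_append_left hp]
      have hins : ∀ x : String,
          PySem.List.insert (u ++ v) (k - 1) x = PySem.List.insert u (k - 1) x ++ v := by
        intro x
        rw [hcast, PySem.List.insert_natCast (u ++ v) _ x
              (by simp only [List.length_append]; omega),
            PySem.List.insert_natCast u _ x (by omega),
            List.take_append_of_le_length (by omega), List.drop_append_of_le_length (by omega)]
        simp
      rw [if_pos hc, if_pos hc, hget, hins]
      apply ih
      intro j hj hcj
      have hju := h j (List.mem_cons_of_mem _ hj) hcj
      rw [hcast, PySem.List.insert_natCast u _ _ (by omega)]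
      simp only [List.length_append, List.length_take, List.length_cons, List.length_drop]
      push_cast
      omega
    · rw [if_neg hc, if_neg hc]
      exact ih u v (fun j hj hcj => h j (List.mem_cons_of_mem _ hj) hcj)

lemma bFold (d : PySem.Dict Int String) (n : Int) :
    ∀ (ks : List Int) (ls : List String),
      ks.Pairwise (fun a b => b < a) →
      (∀ k ∈ ks, (1 ≤ k ∧ k ≤ n) ↔ (1 ≤ k ∧ k ≤ (ls.length : Int))) →
      ks.foldl
        (fun ls i =>
          if 1 ≤ i ∧ i ≤ n then
            PySem.List.insert ls (i - 1)
              (pvIndent (PySem.List.pyGetD ls (i - 1) "") ++ d.getD i "")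
          else ls) ls
      = interC (fun j => d.getD j "") ks ls 1 := by
  intro ks
  induction ks with
  | nil =>
    intro ls _ _
    simp only [List.foldl_nil]
    exact (interC_no_hit (fun j => d.getD j "") [] ls 1 (by simp)).symm
  | cons k rest ih =>
    intro ls hchain hn
    have hrest : rest.Pairwise (fun a b => b < a) := hchain.tail
    have hklt : ∀ j ∈ rest, j < k := fun j hj => (List.pairwise_cons.mp hchain).1 j hj
    simp only [List.foldl_cons]
    by_cases hc : 1 ≤ k ∧ k ≤ n
    · -- in range: splice at position k-1
      have hkL : 1 ≤ k ∧ k ≤ (ls.length : Int) := (hn k List.mem_cons_self).mp hc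
      set p : Nat := (k - 1).toNat with hp
      have hpL : p < ls.length := by omega
      have hcast : k - 1 = ((p : Nat) : Int) := by omega
      have hget : PySem.List.pyGetD ls (k - 1) "" = ls[p] :=
        PySem.List.pyGetD_eq_getElem ls "" (by omega) (by omega)
      rw [if_pos hc, hcast, PySem.List.insert_natCast ls p _ (by omega)]
      set c : String := pvIndent (PySem.List.pyGetD ls (↑p) "") ++ d.getD k "" with hcdef
      have hdrop : List.drop p ls = ls[p] :: List.drop (p + 1) ls := List.drop_eq_getElem_cons hpL
      have hsplit : List.take p ls ++ c :: List.drop p ls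
          = List.take p ls ++ (c :: List.drop p ls) := rfl
      rw [hsplit, bFold_prefix d n rest (List.take p ls) (c :: List.drop p ls)
            (by intro j hj hcj
                have := hklt j hj
                simp [List.length_take]
                omega)]
      have hlt : (List.take p ls).length = p := by
        rw [List.length_take]; omega
      rw [ih (List.take p ls) hrest
            (by intro j hj
                have hjk := hklt j hj
                have hjn := hn j (List.mem_cons_of_mem _ hj)
                rw [hlt]
                omega)]
      -- right-hand side
      conv_rhs => rw [show ls = List.take p ls ++ List.drop p ls from (List.take_append_drop p ls).symm]
      rw [interC_append]
      rw [hlt]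
      have h1p : (1 : Int) + (p : Int) = k := by omega
      rw [h1p, hdrop]
      have hkmem : k ∈ k :: rest := List.mem_cons_self
      simp only [interC, if_pos hkmem]
      rw [interC_no_hit (fun j => d.getD j "") (k :: rest) (List.drop (p + 1) ls) (k + 1)
            (by intro j hj
                rcases List.mem_cons.mp hj with rfl | hj
                · omega
                · have := hklt j hj; omega)]
      rw [interC_congr (fun j => d.getD j "") rest (k :: rest) (List.take p ls) 1
            (by intro j h1 h2
                simp [List.length_take] at h2
                constructor
                · exact fun hm => List.mem_cons_of_mem _ hm
                · intro hm
                  rcases List.mem_cons.mp hm with rfl | hm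
                  · omega
                  · exact hm)]
      have hget' : PySem.List.pyGetD ls ((p : Nat) : Int) "" = ls[p] := by
        rw [← hcast]; exact hget
      simp [hcdef, hget']
    · -- skipped: k out of range
      rw [if_neg hc]
      have hkout : ¬ (1 ≤ k ∧ k ≤ (ls.length : Int)) := fun h => hc ((hn k List.mem_cons_self).mpr h)
      rw [ih ls hrest (fun j hj => hn j (List.mem_cons_of_mem _ hj))]
      apply interC_congr
      intro j h1 h2
      constructor
      · exact fun hm => List.mem_cons_of_mem _ hm
      · intro hm
        rcases List.mem_cons.mp hm with rfl | hm
        · exact absurd ⟨h1, by omega⟩ hkout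
        · exact hm

-- ===== VERDICT (by name: the statement is the Claim_ definition above) =====
theorem add_comments_to_code_spec : Claim_equal_add_comments_to_code := by
  intro code comments language _hdom
  unfold Spec_add_comments_to_code add_comments_to_code add_comments_to_code_alt
  dsimp only
  set lines := (PySem.Str.split? code "\n").getD [] with hlines
  set m : PySem.Dict Int String :=
    comments.foldl (fun d p => d.insert p.1 p.2) PySem.Dict.empty with hm
  set ks := PySem.List.sorted m.keys (fun k => k) true with hks
  have hnodup_keys : m.keys.Nodup := by
    rw [hm]
    exact PySem.Dict.nodup_keys_foldl_insert_key comments (fun p => p.1) (fun _ p => p.2)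
      PySem.Dict.empty (by simp)
  have hnodup : ks.Nodup := ((PySem.List.sorted_perm m.keys (fun k => k) true).nodup_iff).mpr hnodup_keys
  have hchain : ks.Pairwise (fun a b => b < a) := by
    have hle := PySem.List.sorted_pairwise_rev m.keys (fun k => k)
    have := hle.and hnodup
    exact this.imp (fun {a b} h => lt_of_le_of_ne h.1 (fun he => h.2 (he.symm)))
  rw [aFold m lines 1 []]
  rw [bFold m (lines.length : Int) ks lines hchain (fun k _ => Iff.rfl)]
  rw [interC_congr (fun j => m.getD j "") m.keys ks lines 1
        (fun j _ _ => by rw [hks, PySem.List.mem_sorted])]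
  simp
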